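-- pv_equiv track=rewrite | github.com/Kamil116/Lessons-inf | 1/25/21422 (kege).py | f
-- ===== SOURCE A (Python) =====
-- def f(x):
--     is_ok = False
--     min_del = None
--     for d in range(2, x):
--         if x % d == 0 and d % 10 == 7 and d != x and d != 7:
--             is_ok = True
--             min_del = d
--             break
--     return is_ok, min_del
-- ===== SOURCE B (Python) =====
-- def f(x):
--     best = None
--     d = 2
--     while d * d <= x:
--         if x % d == 0:
--             for c in (d, x // d):
--                 if c % 10 == 7 and c != 7 and (best is None or c < best):
--                     best = c
--         d += 1
--     return best is not None, best
-- ===== Notes on version B (the rewrite author's own statement) =====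
-- stated objective: faster
-- what changed: Replaces A's linear scan over all proper divisor candidates below x by trial division up to sqrt(x), checking each small factor d and its cofactor x//d and keeping the minimum qualifying divisor; intended as faster (worst case O(sqrt(x)) vs O(x)), measured up to ~75x on probe inputs, ~1x when A breaks early on a small qualifying divisor.
import Mathlib
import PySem

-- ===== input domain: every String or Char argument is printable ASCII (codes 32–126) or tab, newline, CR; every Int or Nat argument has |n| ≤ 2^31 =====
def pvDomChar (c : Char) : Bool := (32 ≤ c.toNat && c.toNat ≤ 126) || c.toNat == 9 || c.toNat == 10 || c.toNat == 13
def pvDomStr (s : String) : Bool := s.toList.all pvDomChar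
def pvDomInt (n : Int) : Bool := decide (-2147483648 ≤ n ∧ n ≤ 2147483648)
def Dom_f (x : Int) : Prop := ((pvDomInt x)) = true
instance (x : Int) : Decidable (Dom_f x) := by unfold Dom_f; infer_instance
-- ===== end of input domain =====

-- B replaces A's linear divisor scan by trial division up to sqrt(x) (each small factor and
-- its cofactor, keeping the minimum qualifying divisor); intended as faster (worst case
-- O(sqrt(x)) vs O(x)); probes measured up to ~75x at the largest size, ~1x when A's early
-- break hits a small qualifying divisor.

-- ===== PORT A =====
-- A's for-loop over range(2, x) with break, as structural recursion over the range list.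
def fFind (x : Int) : List Int → Bool × Option Int
  | [] => (false, none)
  | d :: ds =>
    if PySem.Int.mod x d = 0 ∧ PySem.Int.mod d 10 = 7 ∧ d ≠ x ∧ d ≠ 7 then (true, some d)
    else fFind x ds

def f (x : Int) : Bool × Option Int := fFind x (PySem.List.pyRange 2 x 1)

-- ===== PORT B =====
-- 'if c % 10 == 7 and c != 7 and (best is None or c < best): best = c'
def updB (best : Option Int) (c : Int) : Option Int :=
  match best with
  | none => if PySem.Int.mod c 10 = 7 ∧ c ≠ 7 then some c else none
  | some b => if PySem.Int.mod c 10 = 7 ∧ c ≠ 7 ∧ c < b then some c else some b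

-- B's while-loop: trial divisor d while d*d ≤ x; on a hit, fold the candidates d, x // d.
def fLoopB (x d : Int) (best : Option Int) : Option Int :=
  if h : d * d ≤ x then
    fLoopB x (d + 1)
      (if PySem.Int.mod x d = 0 then updB (updB best d) (PySem.Int.floordiv x d) else best)
  else best
termination_by (x + 1 - d).toNat
decreasing_by
  have hdx : d ≤ x := by nlinarith [mul_self_nonneg d, sq_nonneg (d - 1)]
  omega

def f_alt (x : Int) : Bool × Option Int :=
  let best := fLoopB x 2 none
  (best.isSome, best)

-- ===== PRECONDITION & SPEC =====
def Spec_f (x : Int) (out : Bool × Option Int) : Prop := out = f_alt x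
instance (x : Int) (out : Bool × Option Int) : Decidable (Spec_f x out) := by unfold Spec_f; infer_instance

-- ===== CLAIM (what is proved, stated in full; the proofs are below) =====
def Claim_equal_f : Prop := ∀ (x : Int), Dom_f x → Spec_f x (f x)

-- ===== LEMMAS AND PROOFS =====

-- the qualifying divisors of x (A's loop condition, with d < x from the range)
def Qset (x c : Int) : Prop := 2 ≤ c ∧ c < x ∧ x % c = 0 ∧ c % 10 = 7 ∧ c ≠ 7

-- the qualifying values B can still produce with trial divisor ≥ d
def Cand (x d c : Int) : Prop :=
  ∃ e, d ≤ e ∧ e * e ≤ x ∧ x % e = 0 ∧ (c = e ∨ c = x / e) ∧ c % 10 = 7 ∧ c ≠ 7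

-- what both programs return: false/none if no qualifying divisor, else true/min
def GoodRes (x : Int) (r : Bool × Option Int) : Prop :=
  match r.2 with
  | none => r.1 = false ∧ ∀ c, ¬ Qset x c
  | some m => r.1 = true ∧ Qset x m ∧ ∀ c, Qset x c → m ≤ c

theorem goodRes_unique {x : Int} {r1 r2 : Bool × Option Int}
    (h1 : GoodRes x r1) (h2 : GoodRes x r2) : r1 = r2 := by
  obtain ⟨b1, o1⟩ := r1
  obtain ⟨b2, o2⟩ := r2
  cases o1 <;> cases o2 <;> simp [GoodRes] at h1 h2
  · simp [h1.1, h2.1]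
  · exact absurd h2.2.1 (h1.2 _)
  · exact absurd h1.2.1 (h2.2 _)
  · rename_i m1 m2
    have : m1 = m2 := le_antisymm (h1.2.2 _ h2.2.1) (h2.2.2 _ h1.2.1)
    simp [h1.1, h2.1, this]

theorem cand_sound {x d c : Int} (hd : 2 ≤ d) (h : Cand x d c) : Qset x c := by
  obtain ⟨e, hde, hee, hmod, hor, h7, h77⟩ := h
  have he2 : 2 ≤ e := le_trans hd hde
  have hdvd : e ∣ x := Int.dvd_of_emod_eq_zero hmod
  have hmul : e * (x / e) = x := Int.mul_ediv_cancel' hdvd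
  have hk : e ≤ x / e := (Int.le_ediv_iff_mul_le (by omega)).mpr hee
  have hx2 : e * 2 ≤ e * (x / e) := mul_le_mul_of_nonneg_left (le_trans he2 hk) (by omega)
  rcases hor with rfl | rfl
  · exact ⟨he2, by linarith, hmod, h7, h77⟩
  · have h2k : 2 * (x / e) ≤ e * (x / e) := mul_le_mul_of_nonneg_right he2 (by linarith)
    refine ⟨le_trans he2 hk, by linarith, Int.emod_eq_zero_of_dvd ⟨e, by linarith [mul_comm e (x / e)]⟩, h7, h77⟩

theorem cand_complete {x c : Int} (h : Qset x c) : Cand x 2 c := by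
  obtain ⟨hc2, hcx, hmod, h7, h77⟩ := h
  have hdvd : c ∣ x := Int.dvd_of_emod_eq_zero hmod
  have hmul : c * (x / c) = x := Int.mul_ediv_cancel' hdvd
  by_cases hcc : c * c ≤ x
  · exact ⟨c, hc2, hcc, hmod, Or.inl rfl, h7, h77⟩
  · have hcc' : x < c * c := not_le.mp hcc
    have he1 : 1 ≤ x / c := (Int.le_ediv_iff_mul_le (by omega)).mpr (by linarith)
    have hne1 : x / c ≠ 1 := fun h1 => by rw [h1, mul_one] at hmul; omega
    have he2 : 2 ≤ x / c := by omega
    have hec : x / c < c := by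
      by_contra hge
      have hcle : c ≤ x / c := not_lt.mp hge
      have := mul_le_mul_of_nonneg_left hcle (by omega : (0:Int) ≤ c)
      linarith
    have hee : x / c * (x / c) ≤ x := by
      have h1 : x / c * (x / c) < x / c * c :=
        mul_lt_mul_of_pos_left hec (by omega)
      have h2 : x / c * c = x := by rw [mul_comm]; exact hmul
      linarith
    have hx' : x / c * c = x := by rw [mul_comm]; exact hmul
    have hcval : x / (x / c) = c := by
      have h3 := Int.mul_ediv_cancel_left (b := c) (show x / c ≠ 0 by omega)
      rw [hx'] at h3
      exact h3
    exact ⟨x / c, he2, hee, Int.emod_eq_zero_of_dvd ⟨c, hx'.symm⟩,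
      Or.inr hcval.symm, h7, h77⟩

-- the three bookkeeping facts about B's min-update
theorem updB_some {best : Option Int} {c b : Int}
    (h : updB best c = some b) :
    best = some b ∨ (b = c ∧ c % 10 = 7 ∧ c ≠ 7) := by
  have hm : PySem.Int.mod c 10 = c % 10 := PySem.Int.mod_eq_emod_of_pos (by omega)
  cases best with
  | none =>
    have h' : (if PySem.Int.mod c 10 = 7 ∧ c ≠ 7 then some c else (none : Option Int)) = some b := h
    split_ifs at h' with hcond
    · exact Or.inr ⟨(Option.some.inj h').symm, hm ▸ hcond.1, hcond.2⟩
  | some b0 =>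
    have h' : (if PySem.Int.mod c 10 = 7 ∧ c ≠ 7 ∧ c < b0 then some c else some b0) = some b := h
    split_ifs at h' with hcond
    · exact Or.inr ⟨(Option.some.inj h').symm, hm ▸ hcond.1, hcond.2.1⟩
    · exact Or.inl h'

theorem updB_mono {best : Option Int} {b0 : Int} (c : Int) (h : best = some b0) :
    ∃ b, updB best c = some b ∧ b ≤ b0 := by
  subst h
  simp only [updB]
  split_ifs with hcond
  · exact ⟨c, rfl, le_of_lt hcond.2.2⟩
  · exact ⟨b0, rfl, le_refl b0⟩

theorem updB_hit {c : Int} (best : Option Int)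
    (h7 : c % 10 = 7) (h77 : c ≠ 7) :
    ∃ b, updB best c = some b ∧ b ≤ c := by
  have hm : PySem.Int.mod c 10 = c % 10 := PySem.Int.mod_eq_emod_of_pos (by omega)
  cases best with
  | none => exact ⟨c, by simp only [updB, hm]; rw [if_pos ⟨h7, h77⟩], le_refl c⟩
  | some b0 =>
    simp only [updB, hm]
    split_ifs with hcond
    · exact ⟨c, rfl, le_refl c⟩
    · refine ⟨b0, rfl, ?_⟩
      by_contra hlt
      exact hcond ⟨h7, h77, not_le.mp hlt⟩

-- A's loop computes the least qualifying divisor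
theorem A_good (x : Int) : ∀ (n : Nat) (a : Int), (x - a).toNat = n → 2 ≤ a →
    (∀ c, Qset x c → a ≤ c) → GoodRes x (fFind x (PySem.List.pyRange a x 1)) := by
  intro n
  induction n using Nat.strong_induction_on with
  | _ n ih =>
    intro a hn ha2 hmin
    by_cases hax : a < x
    · rw [PySem.List.pyRange_one_cons hax]
      have hmx : PySem.Int.mod x a = x % a := PySem.Int.mod_eq_emod_of_pos (by omega)
      have hm10 : PySem.Int.mod a 10 = a % 10 := PySem.Int.mod_eq_emod_of_pos (by omega)
      by_cases hc : PySem.Int.mod x a = 0 ∧ PySem.Int.mod a 10 = 7 ∧ a ≠ x ∧ a ≠ 7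
      · rw [fFind, if_pos hc]
        exact ⟨rfl, ⟨ha2, hax, by rw [← hmx]; exact hc.1, by rw [← hm10]; exact hc.2.1,
          hc.2.2.2⟩, fun c hq => hmin c hq⟩
      · rw [fFind, if_neg hc]
        refine ih (x - (a+1)).toNat (by omega) (a+1) rfl (by omega) ?_
        intro c hq
        have hac := hmin c hq
        rcases eq_or_lt_of_le hac with rfl | h
        · exact absurd ⟨by rw [hmx]; exact hq.2.2.1, by rw [hm10]; exact hq.2.2.2.1,
            by omega, hq.2.2.2.2⟩ hc
        · omega
    · rw [PySem.List.pyRange_one_eq_nil (by omega)]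
      exact ⟨rfl, fun c hq => by have := hmin c hq; have := hq.2.1; omega⟩

-- B's loop computes the least qualifying divisor
theorem B_good (x : Int) : ∀ (n : Nat) (d : Int) (best : Option Int),
    (x + 1 - d).toNat = n → 2 ≤ d →
    (∀ b, best = some b → Qset x b) →
    (∀ c, Qset x c → Cand x d c ∨ ∃ b, best = some b ∧ b ≤ c) →
    GoodRes x ((fLoopB x d best).isSome, fLoopB x d best) := by
  intro n
  induction n using Nat.strong_induction_on with
  | _ n ih =>
    intro d best hn hd2 hsound hcov
    by_cases hdd : d * d ≤ x
    · rw [fLoopB, dif_pos hdd]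
      set q := PySem.Int.floordiv x d with hq
      have hqe : q = x / d := PySem.Int.floordiv_eq_ediv_of_pos (by omega)
      have hmx : PySem.Int.mod x d = x % d := PySem.Int.mod_eq_emod_of_pos (by omega)
      set best1 := if PySem.Int.mod x d = 0 then updB (updB best d) q else best with hb1
      have hqpos : (0:Int) < q := by
        rw [hqe]
        have := (Int.le_ediv_iff_mul_le (by omega : (0:Int) < d)).mpr hdd
        omega
      have hsound1 : ∀ b, best1 = some b → Qset x b := by
        intro b hb
        rw [hb1] at hb
        split_ifs at hb with hmod
        · rcases updB_some hb with hb' | ⟨rfl, h7, h77⟩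
          · rcases updB_some hb' with hb'' | ⟨rfl, h7, h77⟩
            · exact hsound b hb''
            · exact cand_sound hd2 ⟨b, le_refl b, hdd, by rw [← hmx]; exact hmod,
                Or.inl rfl, h7, h77⟩
          · exact cand_sound hd2 ⟨d, le_refl d, hdd, by rw [← hmx]; exact hmod,
              Or.inr hqe, h7, h77⟩
        · exact hsound b hb
      have hcov1 : ∀ c, Qset x c → Cand x (d+1) c ∨ ∃ b, best1 = some b ∧ b ≤ c := by
        intro c hqc
        rcases hcov c hqc with ⟨e, hde, hee, hemod, hor, h7, h77⟩ | ⟨b, hb, hbc⟩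
        · rcases eq_or_lt_of_le hde with rfl | hlt
          · -- e = d : candidate processed this iteration
            right
            have hmod : PySem.Int.mod x d = 0 := by rw [hmx]; exact hemod
            rw [hb1, if_pos hmod]
            rcases hor with rfl | rfl
            · obtain ⟨b1, hb1', hble⟩ := updB_hit best h7 h77
              obtain ⟨b2, hb2', hble2⟩ := updB_mono q hb1'
              exact ⟨b2, hb2', by omega⟩
            · obtain ⟨b2, hb2', hble2⟩ := updB_hit (c := q) (updB best d)
                (by rw [hqe]; exact h7) (by rw [hqe]; exact h77)
              exact ⟨b2, hb2', by rw [← hqe]; exact hble2⟩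
          · exact Or.inl ⟨e, by omega, hee, hemod, hor, h7, h77⟩
        · right
          rw [hb1]
          split_ifs with hmod
          · obtain ⟨b1, hb1', hble⟩ := updB_mono d hb
            obtain ⟨b2, hb2', hble2⟩ := updB_mono q hb1'
            exact ⟨b2, hb2', by omega⟩
          · exact ⟨b, hb, hbc⟩
      have hdx : d ≤ x := by nlinarith [mul_self_nonneg d]
      exact ih (x + 1 - (d+1)).toNat (by omega) (d+1) best1 rfl (by omega) hsound1 hcov1
    · rw [fLoopB, dif_neg hdd]
      have hnocand : ∀ c, ¬ Cand x d c := by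
        rintro c ⟨e, hde, hee, -⟩
        have : d * d ≤ e * e := by nlinarith
        omega
      cases best with
      | none =>
        refine ⟨rfl, fun c hqc => ?_⟩
        rcases hcov c hqc with hcand | ⟨b, hb, -⟩
        · exact hnocand c hcand
        · simp at hb
      | some m =>
        refine ⟨rfl, hsound m rfl, fun c hqc => ?_⟩
        rcases hcov c hqc with hcand | ⟨b, hb, hbc⟩
        · exact absurd hcand (hnocand c)
        · have := Option.some.inj hb; omega

-- ===== VERDICT (by name: the statement is the Claim_ definition above) =====
theorem f_spec : Claim_equal_f := by
  intro x _
  unfold Spec_f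
  have hA : GoodRes x (f x) := by
    unfold f
    exact A_good x (x - 2).toNat 2 rfl (le_refl 2) (fun c hq => hq.1)
  have hB : GoodRes x (f_alt x) := by
    unfold f_alt
    exact B_good x (x + 1 - 2).toNat 2 none rfl (le_refl 2)
      (fun b hb => by simp at hb)
      (fun c hq => Or.inl (cand_complete hq))
  exact goodRes_unique hA hB
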